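-- pv_equiv track=rewrite | github.com/kochungcheon/Algo | 백준/Silver/7696. 반복하지 않는 수/반복하지 않는 수.py | check
-- ===== SOURCE A (Python) =====
-- def check(num):
--     lst = [0] * 10;
--     while num:
--         temp = num % 10
--         lst[temp] += 1
--         if lst[temp] >= 2:
--             return False
--         num //= 10
--     return True
-- ===== SOURCE B (Python) =====
-- def check(num):
--     s = str(num)
--     return len(set(s)) == len(s)
-- ===== Notes on version B (the rewrite author's own statement) =====
-- stated objective: idiomatic
-- what changed: Replaces the explicit digit-extraction loop with a ten-slot frequency array and early exit by a single string conversion and a set-size comparison over the characters.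
-- outside the precondition, e.g. on check(-12): A returns False, B returns True; on check(-1): A returns False, B returns True
import Mathlib
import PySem

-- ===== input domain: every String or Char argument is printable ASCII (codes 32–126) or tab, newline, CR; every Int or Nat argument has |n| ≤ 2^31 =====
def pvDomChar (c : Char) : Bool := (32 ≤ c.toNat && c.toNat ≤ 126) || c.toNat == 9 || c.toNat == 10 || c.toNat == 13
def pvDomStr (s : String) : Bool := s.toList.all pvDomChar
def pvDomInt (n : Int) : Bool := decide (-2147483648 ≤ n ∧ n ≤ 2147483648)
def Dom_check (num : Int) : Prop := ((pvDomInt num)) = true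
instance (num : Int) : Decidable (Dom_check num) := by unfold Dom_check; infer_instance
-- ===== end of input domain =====

-- B replaces A's digit-extraction loop with a frequency array by a string conversion and a
-- set-size comparison (idiomatic, same cost). Pre_ excludes negative inputs, on which A's
-- always-False answer (an artefact of floored division looping at -1) and B's answer over the
-- '-'-prefixed string are both accidental; the problem's domain is nonnegative integers.


-- ===== PORT A =====
-- A's while loop: each iteration takes temp = num % 10, bumps lst[temp], returns False on a
-- second hit, and floor-divides num by 10.  The loop never runs more than 11 times (eleven
-- increments into ten slots force a second hit), so fuel 12 is a totality guard only.
def checkLoop : Nat → List Int → Int → Bool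
  | 0, _, _ => true   -- unreachable: the loop body runs at most 11 times
  | fuel + 1, lst, num =>
    if num ≠ 0 then
      let temp := PySem.Int.mod num 10
      let c := PySem.List.pyGetD lst temp 0 + 1
      let lst' := PySem.List.pySetD lst temp c
      if c ≥ 2 then false
      else checkLoop fuel lst' (PySem.Int.floordiv num 10)
    else true

def check (num : Int) : Bool := checkLoop 12 (List.replicate 10 0) num

-- ===== PORT B =====
def check_alt (num : Int) : Bool :=
  let s := PySem.Int.toStr num
  PySem.Set.len (PySem.Set.ofList s.toList) == PySem.Str.len s

-- ===== PRECONDITION & SPEC =====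
-- Pre_ excludes negative inputs (on which A returns False via the floored-division loop at -1
-- and B judges the '-'-prefixed string: both corner behaviours are accidental).
def Pre_check (num : Int) : Prop := 0 ≤ num
instance (num : Int) : Decidable (Pre_check num) := by unfold Pre_check; infer_instance
def pvWitness_check : Int := (1023)
def Spec_check (num : Int) (out : Bool) : Prop := out = check_alt num
instance (num : Int) (out : Bool) : Decidable (Spec_check num out) := by unfold Spec_check; infer_instance

-- ===== CLAIM (what is proved, stated in full; the proofs are below) =====
def Claim_equal_check : Prop := ∀ (num : Int), Dom_check num → Pre_check num → Spec_check num (check num)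

-- ===== LEMMAS AND PROOFS =====

-- the seen-digit count list A maintains, as a function of the set of digits seen so far
def encodeSeen (seen : List Nat) : List Int :=
  (List.range 10).map (fun d => if d ∈ seen then (1 : Int) else 0)

theorem encodeSeen_get (seen : List Nat) (d : Nat) (hd : d < 10) :
    PySem.List.pyGetD (encodeSeen seen) (d : Int) 0 = if d ∈ seen then (1 : Int) else 0 := by
  rw [PySem.List.pyGetD_natCast]
  simp [encodeSeen, List.getD_eq_getElem?_getD, hd]

theorem encodeSeen_set (seen : List Nat) (d : Nat) (hd : d < 10) (hnot : d ∉ seen) :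
    PySem.List.pySetD (encodeSeen seen) (d : Int) ((if d ∈ seen then (1 : Int) else 0) + 1)
      = encodeSeen (d :: seen) := by
  rw [PySem.List.pySetD_natCast]
  apply List.ext_getElem
  · simp [encodeSeen]
  · intro i h1 h2
    simp only [encodeSeen, List.length_map, List.length_range] at h1 h2 ⊢
    rcases eq_or_ne i d with rfl | hne
    · simp [hnot]
    · simp [hne.symm, List.mem_cons, hne]

-- the loop invariant: with fuel exceeding the digit count, A's loop decides whether the
-- remaining digits are pairwise distinct and disjoint from the digits already seen
theorem checkLoop_spec : ∀ (fuel : Nat) (seen : List Nat) (num : Int), 0 ≤ num →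
    num.toNat < 10 ^ fuel →
    checkLoop fuel (encodeSeen seen) num =
      decide ((Nat.digits 10 num.toNat).Nodup ∧ ∀ d ∈ Nat.digits 10 num.toNat, d ∉ seen) := by
  intro fuel
  induction fuel with
  | zero =>
    intro seen num h0 hlt
    have : num = 0 := by omega
    subst this
    simp [checkLoop]
  | succ f ih =>
    intro seen num h0 hlt
    rcases eq_or_ne num 0 with rfl | hne
    · simp [checkLoop]
    · have hpos : 0 < num := lt_of_le_of_ne h0 (Ne.symm hne)
      have hn : 0 < num.toNat := by omega
      have hmod : PySem.Int.mod num 10 = ((num.toNat % 10 : Nat) : Int) := by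
        simp only [PySem.Int.mod, Int.fmod_eq_emod]
        norm_num
        omega
      have hdiv : PySem.Int.floordiv num 10 = ((num.toNat / 10 : Nat) : Int) := by
        simp only [PySem.Int.floordiv, Int.fdiv_eq_ediv]
        norm_num
        omega
      have hmlt : num.toNat % 10 < 10 := Nat.mod_lt _ (by norm_num)
      have hdig : Nat.digits 10 num.toNat
          = num.toNat % 10 :: Nat.digits 10 (num.toNat / 10) :=
        Nat.digits_def' (by norm_num) hn
      simp only [checkLoop, if_pos hne, hmod, encodeSeen_get seen _ hmlt]
      by_cases hmem : num.toNat % 10 ∈ seen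
      · rw [if_pos (by simp [hmem])]
        have : ¬ ((Nat.digits 10 num.toNat).Nodup ∧ ∀ d ∈ Nat.digits 10 num.toNat, d ∉ seen) := by
          rw [hdig]; rintro ⟨-, hall⟩
          exact hall _ (List.mem_cons_self) hmem
        simp [this]
      · rw [if_neg (by simp [hmem]), encodeSeen_set seen _ hmlt hmem, hdiv]
        have hmul : num.toNat < 10 * 10 ^ f := by
          have : (10 : Nat) ^ (f + 1) = 10 * 10 ^ f := pow_succ' 10 f
          omega
        have hlt' : (((num.toNat / 10 : Nat) : Int)).toNat < 10 ^ f := by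
          simpa only [Int.toNat_natCast] using Nat.div_lt_of_lt_mul hmul
        rw [ih (num.toNat % 10 :: seen) _ (by positivity) hlt']
        simp only [Int.toNat_natCast, hdig, List.nodup_cons, List.mem_cons, not_or,
          decide_eq_decide]
        constructor
        · rintro ⟨hnd, hall⟩
          refine ⟨⟨fun hc => (hall _ hc).1 rfl, hnd⟩, ?_⟩
          rintro d (rfl | hd)
          · exact hmem
          · exact (hall d hd).2
        · rintro ⟨⟨hnin, hnd⟩, hall⟩
          exact ⟨hnd, fun d hd => ⟨fun h => hnin (h ▸ hd), hall d (Or.inr hd)⟩⟩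

theorem replicate_eq_encode : List.replicate 10 (0 : Int) = encodeSeen [] := by decide

-- A computes: the decimal digits of num are pairwise distinct
theorem check_eq_digits (num : Int) (h0 : 0 ≤ num) (hub : num ≤ 2147483648) :
    check num = decide ((Nat.digits 10 num.toNat).Nodup) := by
  rw [check, replicate_eq_encode,
      checkLoop_spec 12 [] num h0 (by omega)]
  simp

-- Nat.toDigits written through Nat.digits
theorem toDigitsCore_eq : ∀ (f n : Nat) (ds : List Char), 0 < n → n < f →
    Nat.toDigitsCore 10 f n ds = ((Nat.digits 10 n).map Nat.digitChar).reverse ++ ds := by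
  intro f
  induction f with
  | zero => intro n ds h1 h2; omega
  | succ f ih =>
    intro n ds h1 h2
    rw [Nat.digits_def' (b := 10) (by norm_num) h1]
    by_cases hz : n / 10 = 0
    · show (if n / 10 = 0 then (n % 10).digitChar :: ds
          else Nat.toDigitsCore 10 f (n / 10) ((n % 10).digitChar :: ds)) = _
      rw [if_pos hz, hz]
      simp
    · show (if n / 10 = 0 then (n % 10).digitChar :: ds
          else Nat.toDigitsCore 10 f (n / 10) ((n % 10).digitChar :: ds)) = _
      rw [if_neg hz, ih (n / 10) _ (Nat.pos_of_ne_zero hz) (by omega)]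
      simp

theorem toDigits_eq (n : Nat) :
    Nat.toDigits 10 n = if n = 0 then ['0'] else ((Nat.digits 10 n).map Nat.digitChar).reverse := by
  rcases eq_or_ne n 0 with rfl | h
  · decide
  · rw [if_neg h, Nat.toDigits, toDigitsCore_eq (n + 1) n [] (Nat.pos_of_ne_zero h) (by omega)]
    simp

-- the set-size comparison decides Nodup
theorem ofList_len_eq_iff (l : List Char) :
    (PySem.Set.ofList l).length = l.length ↔ l.Nodup := by
  constructor
  · intro h
    have hfin : (PySem.Set.ofList l).toFinset = l.toFinset := by
      ext x; simp [PySem.Set.mem_ofList]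
    have h1 : (PySem.Set.ofList l).toFinset.card = (PySem.Set.ofList l).length :=
      List.toFinset_card_of_nodup (PySem.Set.nodup_ofList l)
    have h2 : l.dedup.toFinset.card = l.dedup.length :=
      List.toFinset_card_of_nodup l.nodup_dedup
    have hdd : l.dedup.toFinset = l.toFinset := by ext x; simp
    rw [hdd] at h2
    have : l.dedup.length = l.length := by rw [← h2, ← hfin, h1, h]
    rw [← List.dedup_eq_self]
    exact (List.dedup_sublist l).eq_of_length this
  · intro h
    rw [PySem.Set.ofList_eq_self_of_nodup l h]

theorem digitChar_injOn : ∀ a < 10, ∀ b < 10, Nat.digitChar a = Nat.digitChar b → a = b := by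
  decide

-- B computes the same predicate
theorem check_alt_eq_digits (num : Int) (h0 : 0 ≤ num) :
    check_alt num = decide ((Nat.digits 10 num.toNat).Nodup) := by
  have hchars : PySem.Int.toChars num = Nat.toDigits 10 num.toNat := by
    simp [PySem.Int.toChars, not_lt.mpr h0]
  simp only [check_alt, PySem.Set.len, PySem.Str.len, PySem.Int.toList_toStr, hchars,
    toDigits_eq]
  rcases eq_or_ne num.toNat 0 with hz | hnz
  · rw [hz]; decide
  · rw [if_neg hnz]
    have hinj : ∀ x ∈ Nat.digits 10 num.toNat, ∀ y ∈ Nat.digits 10 num.toNat,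
        Nat.digitChar x = Nat.digitChar y → x = y := by
      intro x hx y hy
      exact digitChar_injOn x (Nat.digits_lt_base (by norm_num) hx) y
        (Nat.digits_lt_base (by norm_num) hy)
    have hiff : (((Nat.digits 10 num.toNat).map Nat.digitChar).reverse).Nodup ↔
        (Nat.digits 10 num.toNat).Nodup := by
      rw [List.nodup_reverse]
      exact ⟨fun h => h.of_map _, fun h => h.map_on hinj⟩
    rw [Bool.beq_eq_decide_eq]
    rw [decide_eq_decide, Nat.cast_inj, ofList_len_eq_iff]
    exact hiff

-- ===== VERDICT (by name: the statement is the Claim_ definition above) =====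
theorem check_spec : Claim_equal_check := by
  intro num hdom hpre
  unfold Spec_check
  have hub : num ≤ 2147483648 := by
    have h := hdom
    unfold Dom_check pvDomInt at h
    exact (of_decide_eq_true h).2
  rw [check_eq_digits num hpre hub, check_alt_eq_digits num hpre]
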